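-- pv_equiv track=rewrite | github.com/therbert448/Advent-of-Code | 2020/Day 16/Day16.py | count_fields
-- ===== SOURCE A (Python) =====
-- def count_fields(fields, tixlen):
--     #count how many fields the ith number on a ticket is valid for
--     fieldcount = []
--     for i in range(tixlen):
--         count = 0
--         for f in fields:
--             if i in fields[f]:
--                 count += 1
--         fieldcount.append(count)
--     return fieldcount
-- ===== SOURCE B (Python) =====
-- def count_fields(fields, tixlen):
--     # scatter/accumulate: one pass over the field value sets instead of a
--     # membership probe of every field for every index
--     fieldcount = [0] * tixlen
--     for vals in fields.values():
--         for v in set(vals):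
--             if 0 <= v < tixlen:
--                 fieldcount[v] += 1
--     return fieldcount
-- ===== Notes on version B (the rewrite author's own statement) =====
-- stated objective: faster
-- what changed: Replaces the per-index membership probe of every field (for each i in range(tixlen), test i in each field's value set) by a single scatter pass: allocate [0]*tixlen and increment fieldcount[v] for each in-range value v of each field.
import Mathlib
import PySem

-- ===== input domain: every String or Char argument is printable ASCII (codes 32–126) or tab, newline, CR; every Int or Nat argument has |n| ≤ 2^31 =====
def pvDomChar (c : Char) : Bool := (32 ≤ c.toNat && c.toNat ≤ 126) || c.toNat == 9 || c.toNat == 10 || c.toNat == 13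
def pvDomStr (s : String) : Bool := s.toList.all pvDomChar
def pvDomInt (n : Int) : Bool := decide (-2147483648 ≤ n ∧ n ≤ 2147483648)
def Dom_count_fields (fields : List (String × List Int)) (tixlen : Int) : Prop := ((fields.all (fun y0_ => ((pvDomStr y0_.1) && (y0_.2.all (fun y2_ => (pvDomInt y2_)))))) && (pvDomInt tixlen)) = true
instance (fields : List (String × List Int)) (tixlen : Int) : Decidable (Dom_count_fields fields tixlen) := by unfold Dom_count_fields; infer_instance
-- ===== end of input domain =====

-- B replaces A's per-index membership probing of every field by a single scatter
-- pass over the field value sets (objective: faster).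

-- ===== PORT A =====
-- for i in range(tixlen): count = 0; for f in fields: if i in fields[f]: count += 1; fieldcount.append(count)
def count_fields (fields : List (String × List Int)) (tixlen : Int) : List Int :=
  (PySem.List.pyRange 0 tixlen 1).foldl
    (fun fieldcount i =>
      let count : Int := fields.foldl (fun c f => if f.2.contains i then c + 1 else c) 0
      fieldcount ++ [count]) []

-- ===== PORT B =====
-- fieldcount = [0]*tixlen; for vals in fields.values(): for v in set(vals): if 0 <= v < tixlen: fieldcount[v] += 1
def count_fields_alt (fields : List (String × List Int)) (tixlen : Int) : List Int :=
  fields.foldl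
    (fun arr f =>
      (PySem.Set.ofList f.2).foldl
        (fun a v => if 0 ≤ v ∧ v < tixlen then a.set v.toNat (a.getD v.toNat 0 + 1) else a)
        arr)
    (List.replicate tixlen.toNat 0)

-- ===== PRECONDITION & SPEC =====
def Spec_count_fields (fields : List (String × List Int)) (tixlen : Int) (out : List Int) : Prop := out = count_fields_alt fields tixlen
instance (fields : List (String × List Int)) (tixlen : Int) (out : List Int) : Decidable (Spec_count_fields fields tixlen out) := by unfold Spec_count_fields; infer_instance

-- ===== CLAIM (what is proved, stated in full; the proofs are below) =====
def Claim_equal_count_fields : Prop := ∀ (fields : List (String × List Int)) (tixlen : Int), Dom_count_fields fields tixlen → Spec_count_fields fields tixlen (count_fields fields tixlen)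

-- ===== LEMMAS AND PROOFS =====

-- one inner scatter step
def pvStep (t : Int) (a : List Int) (v : Int) : List Int :=
  if 0 ≤ v ∧ v < t then a.set v.toNat (a.getD v.toNat 0 + 1) else a

lemma pvStep_length (t : Int) (a : List Int) (v : Int) : (pvStep t a v).length = a.length := by
  unfold pvStep; split_ifs <;> simp

lemma pvInner_length (t : Int) (S : List Int) (a : List Int) :
    (S.foldl (pvStep t) a).length = a.length := by
  induction S generalizing a with
  | nil => rfl
  | cons v S ih => simp [List.foldl_cons, ih, pvStep_length]

lemma pvStep_getD (t : Int) (a : List Int) (v : Int) (j : Nat)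
    (hj : j < a.length) (hjt : (j : Int) < t) :
    (pvStep t a v).getD j 0 = a.getD j 0 + (if v = (j : Int) then 1 else 0) := by
  unfold pvStep
  split_ifs with h hv hv
  · -- guard holds, v = j
    subst hv
    simp [List.getD_eq_getElem?_getD, hj]
  · -- guard holds, v ≠ j : a different (in-range) cell is set
    have : v.toNat ≠ j := by omega
    simp [List.getD_eq_getElem?_getD, List.getElem?_set_ne this]
  · -- guard fails, yet v = j : impossible since 0 ≤ j and j < t
    omega
  · simp

lemma pvInner_getD (t : Int) (S : List Int) (a : List Int) (j : Nat)
    (hj : j < a.length) (hjt : (j : Int) < t) :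
    (S.foldl (pvStep t) a).getD j 0 = a.getD j 0 + (S.count ((j : Nat) : Int) : Int) := by
  induction S generalizing a with
  | nil => simp
  | cons v S ih =>
    rw [List.foldl_cons, ih _ (by rw [pvStep_length]; exact hj),
        pvStep_getD t a v j hj hjt, List.count_cons]
    by_cases hv : v = (j : Int)
    · simp [hv]; ring
    · simp [hv]

lemma pvSet_count (vals : List Int) (x : Int) :
    ((PySem.Set.ofList vals).count x : Int) = (if vals.contains x then 1 else 0) := by
  by_cases hx : x ∈ vals
  · rw [List.count_eq_one_of_mem (PySem.Set.nodup_ofList vals) ((PySem.Set.mem_ofList vals x).2 hx)]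
    simp [hx]
  · rw [List.count_eq_zero_of_not_mem (by simpa [PySem.Set.mem_ofList] using hx)]
    simp [hx]

lemma pvOuter_length (fields : List (String × List Int)) (t : Int) (a : List Int) :
    (fields.foldl (fun arr f => (PySem.Set.ofList f.2).foldl (pvStep t) arr) a).length
      = a.length := by
  induction fields generalizing a with
  | nil => rfl
  | cons f fs ih => simp [List.foldl_cons, ih, pvInner_length]

lemma pvOuter_getD (fields : List (String × List Int)) (t : Int) (a : List Int) (j : Nat)
    (hj : j < a.length) (hjt : (j : Int) < t) :
    (fields.foldl (fun arr f => (PySem.Set.ofList f.2).foldl (pvStep t) arr) a).getD j 0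
      = a.getD j 0 + (fields.countP (fun f => f.2.contains ((j : Nat) : Int)) : Int) := by
  induction fields generalizing a with
  | nil => simp
  | cons f fs ih =>
    rw [List.foldl_cons, ih _ (by rw [pvInner_length]; exact hj),
        pvInner_getD t (PySem.Set.ofList f.2) a j hj hjt, pvSet_count, List.countP_cons]
    rcases Bool.eq_false_or_eq_true (f.2.contains ((j : Nat) : Int)) with hc | hc
    · rw [hc]; simp; ring
    · rw [hc]; simp

-- ===== VERDICT (by name: the statement is the Claim_ definition above) =====
lemma pvAlt_eq (fields : List (String × List Int)) (t : Int) :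
    count_fields_alt fields t
      = fields.foldl (fun arr f => (PySem.Set.ofList f.2).foldl (pvStep t) arr)
          (List.replicate t.toNat 0) := rfl

theorem count_fields_spec : Claim_equal_count_fields := by
  intro fields tixlen _
  show count_fields fields tixlen = count_fields_alt fields tixlen
  rw [pvAlt_eq]
  unfold count_fields
  rw [PySem.List.foldl_append_singleton_eq_map]
  apply List.ext_getElem
  · simp [PySem.List.length_pyRange_one, pvOuter_length]
  · intro j hj1 hj2
    have hjlen : j < tixlen.toNat := by
      simpa [pvOuter_length] using hj2
    have hjt : (j : Int) < tixlen := by omega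
    simp only [List.nil_append, List.getElem_map,
      PySem.List.getElem_pyRange_one, zero_add]
    rw [PySem.List.foldl_if_add_one]
    rw [List.getElem_eq_getD (fallback := 0),
      pvOuter_getD fields tixlen _ j (by simpa [pvOuter_length] using hjlen) hjt]
    simp
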